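-- pv_equiv track=rewrite | github.com/hongha0704/TIL | Coding_Test/Programmers/Lv_0/189_외계어사전.py | solution
-- ===== SOURCE A (Python) =====
-- def solution(spell, dic):
--     for d in dic:
--         len_d = len(d)
--         for s in spell:
--             if s in d:
--                 d = d.replace(s, '', 1)
--         if not d and len(spell) == len_d:
--             return 1
--     return 2
-- ===== SOURCE B (Python) =====
-- def solution(spell, dic):
--     # Linked-list consumption: instead of rebuilding strings with replace(),
--     # keep, per candidate word, a successor table over character positions
--     # (node 0 is a dummy head, node t holds d[t-1], node n+1 is the end).
--     # Removing a matched piece is one pointer redirection; a word whose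
--     # length differs from len(spell) is skipped without any scanning.
--     # (A sequential first-occurrence scan is kept because the result is
--     # order-dependent for multi-character pieces, so a Counter/sorted
--     # comparison would not be equivalent.)
--     n = len(spell)
--     for d in dic:
--         if len(d) != n:
--             continue
--         nxt = list(range(1, n + 2))
--         live = n
--         for s in spell:
--             prev = 0
--             i = nxt[0]
--             while i <= n:
--                 j, k = i, 0
--                 while k < len(s) and j <= n and d[j - 1] == s[k]:
--                     j, k = nxt[j], k + 1
--                 if k == len(s):
--                     nxt[prev] = j
--                     live -= len(s)
--                     break
--                 prev, i = i, nxt[i]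
--         if live == 0:
--             return 1
--     return 2
-- ===== Notes on version B (the rewrite author's own statement) =====
-- stated objective: faster
-- what changed: B replaces A's per-piece string mutation (membership test + replace building a new string per removal) by a per-word linked-list successor table over character positions — a removal is one pointer redirection and a live-counter update — and skips any word whose length differs from len(spell) before scanning it at all; a Counter/sorted multiset comparison was deliberately not used because A's sequential first-occurrence removal is order-dependent for multi-character pieces.
import Mathlib
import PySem

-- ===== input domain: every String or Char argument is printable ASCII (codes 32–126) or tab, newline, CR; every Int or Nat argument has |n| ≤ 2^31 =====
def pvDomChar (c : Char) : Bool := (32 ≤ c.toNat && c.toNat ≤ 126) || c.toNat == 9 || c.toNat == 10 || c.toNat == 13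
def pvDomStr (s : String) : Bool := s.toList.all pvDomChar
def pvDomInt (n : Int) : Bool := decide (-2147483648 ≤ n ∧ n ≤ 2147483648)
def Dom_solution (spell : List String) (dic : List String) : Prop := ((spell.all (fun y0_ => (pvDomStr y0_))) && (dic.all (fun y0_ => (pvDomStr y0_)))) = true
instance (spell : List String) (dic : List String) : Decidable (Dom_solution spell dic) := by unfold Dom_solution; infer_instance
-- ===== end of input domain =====

-- B replaces A's per-piece string mutation (membership test + replace) by a per-word linked-list
-- successor table over character positions: a removal is one pointer redirection, and words whose
-- length differs from len(spell) are skipped before any scanning (objective: faster on wrong-length-heavy dictionaries).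

-- ===== PORT A =====
-- exact port of d.replace(s, '', 1) (A only calls it under the `s in d` guard, where an
-- occurrence exists): drop the leftmost occurrence of s, keep everything else
def removeFirstA (s : List Char) : List Char → List Char
  | [] => []
  | c :: cs => if s.isPrefixOf (c :: cs) then (c :: cs).drop s.length else c :: removeFirstA s cs

-- the `for d in dic` loop with its early `return 1`
def loopA (spell : List String) : List String → Int
  | [] => 2
  | d :: rest =>
    let lenD := d.toList.length
    let d' := spell.foldl
      (fun acc s => if PySem.Chars.isIn s.toList acc then removeFirstA s.toList acc else acc)
      d.toList
    if d'.isEmpty && spell.length == lenD then 1 else loopA spell rest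

def solution (spell : List String) (dic : List String) : Int := loopA spell dic

-- ===== PORT B =====
-- innermost while: compare the piece s char by char along the successor links, starting at live
-- node j (node t holds d[t-1]; the index is in range whenever j ≤ n on a word with len(d) = n);
-- returns the node after the matched run, or none if the comparison fails
def matchB (d : List Char) (nxt : List Nat) (n : Nat) : List Char → Nat → Option Nat
  | [], j => some j
  | c :: cs, j => if j ≤ n ∧ d.getD (j - 1) ' ' = c then matchB d nxt n cs (nxt.getD j 0) else none

-- middle while (`while i <= n`), with fuel for termination (i strictly increases along the links,
-- so fuel n+1 is never exhausted): scan the live nodes; on the first match, redirect nxt[prev]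
def scanB (d : List Char) (n : Nat) (s : List Char) (nxt : List Nat) (live : Int) :
    Nat → Nat → Nat → List Nat × Int
  | 0, _, _ => (nxt, live)
  | fuel + 1, prev, i =>
    if i ≤ n then
      match matchB d nxt n s i with
      | some j => (nxt.set prev j, live - (s.length : Int))
      | none => scanB d n s nxt live fuel i (nxt.getD i 0)
    else (nxt, live)

-- the `for s in spell` loop: state = (successor table, live counter); nxt = list(range(1, n+2))
def consumeB (spell : List String) (n : Nat) (d : List Char) : List Nat × Int :=
  spell.foldl (fun st s => scanB d n s.toList st.1 st.2 (n + 1) 0 (st.1.getD 0 0))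
    (List.range' 1 (n + 1), (n : Int))

-- the `for d in dic` loop with the `if len(d) != n: continue` filter and the early `return 1`
def loopB (spell : List String) (n : Nat) : List String → Int
  | [] => 2
  | d :: rest =>
    if d.toList.length = n then
      if (consumeB spell n d.toList).2 = 0 then 1 else loopB spell n rest
    else loopB spell n rest

def solution_alt (spell : List String) (dic : List String) : Int := loopB spell spell.length dic

-- ===== PRECONDITION & SPEC =====
def Spec_solution (spell : List String) (dic : List String) (out : Int) : Prop := out = solution_alt spell dic
instance (spell : List String) (dic : List String) (out : Int) : Decidable (Spec_solution spell dic out) := by unfold Spec_solution; infer_instance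

-- ===== CLAIM (what is proved, stated in full; the proofs are below) =====
def Claim_equal_solution : Prop := ∀ (spell : List String) (dic : List String), Dom_solution spell dic → Spec_solution spell dic (solution spell dic)

-- ===== LEMMAS AND PROOFS =====

-- abstraction: the character a node holds, the node chain from i, the string it spells
def chrD (d : List Char) (j : Nat) : Char := d.getD (j - 1) ' '

def nodesF (nxt : List Nat) (n : Nat) : Nat → Nat → List Nat
  | 0, _ => []
  | f + 1, i => if i ≤ n then i :: nodesF nxt n f (nxt.getD i 0) else []

def strFrom (d : List Char) (nxt : List Nat) (n : Nat) (i : Nat) : List Char :=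
  (nodesF nxt n (n + 2) i).map (chrD d)

-- invariant on the successor table: right length, strictly increasing, bounded by the end node
def Good (n : Nat) (nxt : List Nat) : Prop :=
  nxt.length = n + 1 ∧ ∀ i, i ≤ n → i < nxt.getD i 0 ∧ nxt.getD i 0 ≤ n + 1

theorem getD_set_self_nat (l : List Nat) (i a : Nat) (h : i < l.length) :
    (l.set i a).getD i 0 = a := by
  simp [List.getD, h]

theorem getD_set_ne_nat (l : List Nat) (i q a : Nat) (h : q ≠ i) :
    (l.set i a).getD q 0 = l.getD q 0 := by
  simp [List.getD, List.getElem?_set_ne (fun he => h he.symm)]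

-- one step of A's inner loop, as a function
def consumeOne (s : List Char) (acc : List Char) : List Char :=
  if PySem.Chars.isIn s acc then removeFirstA s acc else acc

theorem nodesF_fuel (nxt : List Nat) (n : Nat) (h : Good n nxt) :
    ∀ f₁ f₂ i, n + 2 - i ≤ f₁ → n + 2 - i ≤ f₂ → nodesF nxt n f₁ i = nodesF nxt n f₂ i := by
  intro f₁
  induction f₁ with
  | zero =>
    intro f₂ i h1 h2
    have hi : n + 1 < i := by omega
    cases f₂ with
    | zero => rfl
    | succ f => simp [nodesF, Nat.not_le.mpr (by omega : n < i)]
  | succ f ih =>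
    intro f₂ i h1 h2
    cases f₂ with
    | zero =>
      have hi : n + 1 < i := by omega
      simp [nodesF, Nat.not_le.mpr (by omega : n < i)]
    | succ f' =>
      by_cases hi : i ≤ n
      · have hstep := (h.2 i hi)
        simp only [nodesF, if_pos hi]
        have := ih f' (nxt.getD i 0) (by omega) (by omega)
        rw [this]
      · simp [nodesF, hi]

theorem strFrom_unfold (d : List Char) (nxt : List Nat) (n : Nat) (h : Good n nxt) (i : Nat)
    (hi : i ≤ n) : strFrom d nxt n i = chrD d i :: strFrom d nxt n (nxt.getD i 0) := by
  have hstep := h.2 i hi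
  unfold strFrom
  have : nodesF nxt n (n + 2) i = i :: nodesF nxt n (n + 1) (nxt.getD i 0) := by
    simp [nodesF, hi]
  rw [this, nodesF_fuel nxt n h (n + 1) (n + 2) (nxt.getD i 0) (by omega) (by omega)]
  simp

theorem strFrom_end (d : List Char) (nxt : List Nat) (n : Nat) (i : Nat) (hi : n < i) :
    strFrom d nxt n i = [] := by
  unfold strFrom
  simp [nodesF, Nat.not_le.mpr hi]

-- links at positions ≥ a agree → chains starting at ≥ a agree
theorem strFrom_congr (d : List Char) (nxt nxt' : List Nat) (n a : Nat) (h : Good n nxt)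
    (hagree : ∀ q, a ≤ q → nxt'.getD q 0 = nxt.getD q 0) :
    ∀ i, a ≤ i → strFrom d nxt' n i = strFrom d nxt n i := by
  suffices hn : ∀ f i, a ≤ i → nodesF nxt' n f i = nodesF nxt n f i by
    intro i hi; unfold strFrom; rw [hn]; exact hi
  intro f
  induction f with
  | zero => intro i _; rfl
  | succ f ih =>
    intro i hi
    by_cases hle : i ≤ n
    · simp only [nodesF, if_pos hle, hagree i hi]
      rw [ih (nxt.getD i 0) (by have := h.2 i hle; omega)]
    · simp [nodesF, hle]

theorem matchB_spec (d : List Char) (nxt : List Nat) (n : Nat) (h : Good n nxt) :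
    ∀ (s : List Char) (j : Nat), 0 < j → j ≤ n + 1 →
      (∀ j', matchB d nxt n s j = some j' →
        j ≤ j' ∧ 0 < j' ∧ j' ≤ n + 1 ∧ strFrom d nxt n j = s ++ strFrom d nxt n j') ∧
      (matchB d nxt n s j = none → ¬ s <+: strFrom d nxt n j) := by
  intro s
  induction s with
  | nil =>
    intro j hj0 hjn
    constructor
    · intro j' hj'
      simp only [matchB, Option.some.injEq] at hj'
      subst hj'
      exact ⟨le_refl _, hj0, hjn, by simp⟩
    · intro hnone
      simp [matchB] at hnone
  | cons c cs ih =>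
    intro j hj0 hjn
    by_cases hcond : j ≤ n ∧ d.getD (j - 1) ' ' = c
    · obtain ⟨hjle, hchar⟩ := hcond
      have hstep := h.2 j hjle
      have ihj := ih (nxt.getD j 0) (by omega) (by omega)
      have hunf := strFrom_unfold d nxt n h j hjle
      constructor
      · intro j' hsome
        simp only [matchB, if_pos (And.intro hjle hchar)] at hsome
        obtain ⟨h1, h2, h3, h4⟩ := ihj.1 j' hsome
        refine ⟨by omega, h2, h3, ?_⟩
        have hc : chrD d j = c := hchar
        rw [hunf, h4, hc]
        simp
      · intro hnone
        simp only [matchB, if_pos (And.intro hjle hchar)] at hnone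
        have hnp := ihj.2 hnone
        rw [hunf]
        intro hpre
        rw [List.cons_prefix_cons] at hpre
        exact hnp hpre.2
    · constructor
      · intro j' hsome
        simp only [matchB] at hsome
        rw [if_neg hcond] at hsome
        cases hsome
      · intro _
        by_cases hjle : j ≤ n
        · have hchar : d.getD (j - 1) ' ' ≠ c := fun hc => hcond ⟨hjle, hc⟩
          rw [strFrom_unfold d nxt n h j hjle]
          intro hpre
          rw [List.cons_prefix_cons] at hpre
          exact hchar hpre.1.symm
        · rw [strFrom_end d nxt n j (by omega)]
          simp

theorem consumeOne_nil (s : List Char) : consumeOne s [] = [] := by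
  unfold consumeOne
  split_ifs with h
  · cases s <;> simp [removeFirstA]
  · rfl

theorem consumeOne_cons_of_not_prefix (s : List Char) (c : Char) (cs : List Char)
    (h : ¬ s <+: c :: cs) : consumeOne s (c :: cs) = c :: consumeOne s cs := by
  have hpf : s.isPrefixOf (c :: cs) = false := by
    rw [Bool.eq_false_iff, Ne, List.isPrefixOf_iff_prefix]; exact h
  have hrm : removeFirstA s (c :: cs) = c :: removeFirstA s cs := by
    simp [removeFirstA, hpf]
  unfold consumeOne
  by_cases hin : PySem.Chars.isIn s cs = true
  · have hin' : PySem.Chars.isIn s (c :: cs) = true := by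
      rw [PySem.Chars.isIn_iff_infix] at hin ⊢
      exact hin.trans (List.suffix_cons c cs).isInfix
    rw [if_pos hin', if_pos hin, hrm]
  · have hin' : PySem.Chars.isIn s (c :: cs) = false := by
      rw [PySem.Chars.isIn_eq_false_iff]
      intro hinf
      rcases List.infix_cons_iff.mp hinf with hp | hi
      · exact h hp
      · exact hin (by rw [PySem.Chars.isIn_iff_infix]; exact hi)
    rw [if_neg (by rw [hin']; simp), if_neg hin]

theorem consumeOne_of_append (s t : List Char) : consumeOne s (s ++ t) = t := by
  have hin : PySem.Chars.isIn s (s ++ t) = true := by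
    rw [PySem.Chars.isIn_iff_infix]
    exact (List.prefix_append s t).isInfix
  have hrm : ∀ u, s <+: u → removeFirstA s u = u.drop s.length := by
    intro u hu
    cases u with
    | nil =>
      have : s = [] := List.prefix_nil.mp hu
      subst this; rfl
    | cons c cs =>
      have : s.isPrefixOf (c :: cs) = true := List.isPrefixOf_iff_prefix.mpr hu
      simp [removeFirstA, this]
  unfold consumeOne
  rw [if_pos hin, hrm _ (List.prefix_append s t)]
  simp

theorem scan_spec (d : List Char) (n : Nat) (s : List Char) :
    ∀ (f prev : Nat) (nxt : List Nat) (live : Int), Good n nxt → prev ≤ n →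
      n + 2 - nxt.getD prev 0 ≤ f →
      Good n (scanB d n s nxt live f prev (nxt.getD prev 0)).1 ∧
      strFrom d (scanB d n s nxt live f prev (nxt.getD prev 0)).1 n
          ((scanB d n s nxt live f prev (nxt.getD prev 0)).1.getD prev 0)
        = consumeOne s (strFrom d nxt n (nxt.getD prev 0)) ∧
      (scanB d n s nxt live f prev (nxt.getD prev 0)).2
          + ((strFrom d nxt n (nxt.getD prev 0)).length : Int)
        = live + ((strFrom d (scanB d n s nxt live f prev (nxt.getD prev 0)).1 n
            ((scanB d n s nxt live f prev (nxt.getD prev 0)).1.getD prev 0)).length : Int) ∧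
      (∀ q, q < prev → (scanB d n s nxt live f prev (nxt.getD prev 0)).1.getD q 0 = nxt.getD q 0) := by
  intro f
  induction f with
  | zero =>
    intro prev nxt live hG hprev hf
    have := hG.2 prev hprev
    omega
  | succ f ih =>
    intro prev nxt live hG hprev hf
    have hi := hG.2 prev hprev
    by_cases hile : nxt.getD prev 0 ≤ n
    · cases hm : matchB d nxt n s (nxt.getD prev 0) with
      | some j =>
        have hsB : scanB d n s nxt live (f + 1) prev (nxt.getD prev 0)
            = (nxt.set prev j, live - (s.length : Int)) := by
          simp only [scanB]
          rw [if_pos hile, hm]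
        obtain ⟨hjge, hj0, hjn1, hstr⟩ :=
          (matchB_spec d nxt n hG s (nxt.getD prev 0) (by omega) (by omega)).1 j hm
        have hprevlt : prev < nxt.length := by rw [hG.1]; omega
        have hgset : (nxt.set prev j).getD prev 0 = j := getD_set_self_nat nxt prev j hprevlt
        have hG' : Good n (nxt.set prev j) := by
          refine ⟨by simp [hG.1], ?_⟩
          intro q hq
          by_cases hqp : q = prev
          · subst hqp; rw [hgset]; omega
          · rw [getD_set_ne_nat nxt prev q j hqp]
            exact hG.2 q hq
        have hagree : ∀ q, prev + 1 ≤ q → (nxt.set prev j).getD q 0 = nxt.getD q 0 := by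
          intro q hq
          exact getD_set_ne_nat nxt prev q j (by omega)
        have hstr' : strFrom d (nxt.set prev j) n j = strFrom d nxt n j :=
          strFrom_congr d nxt (nxt.set prev j) n (prev + 1) hG hagree j (by omega)
        rw [hsB]
        refine ⟨hG', ?_, ?_, ?_⟩
        · simp only [hgset, hstr', hstr, consumeOne_of_append]
        · simp only [hgset, hstr', hstr]
          simp [List.length_append]
          ring
        · intro q hq
          exact getD_set_ne_nat nxt prev q j (by omega)
      | none =>
        have hsB : scanB d n s nxt live (f + 1) prev (nxt.getD prev 0)
            = scanB d n s nxt live f (nxt.getD prev 0) (nxt.getD (nxt.getD prev 0) 0) := by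
          simp only [scanB]
          rw [if_pos hile, hm]
        have hnp := (matchB_spec d nxt n hG s (nxt.getD prev 0) (by omega) (by omega)).2 hm
        have hstep := hG.2 (nxt.getD prev 0) hile
        obtain ⟨ihG, ihstr, ihlen, ihq⟩ :=
          ih (nxt.getD prev 0) nxt live hG hile (by omega)
        rw [hsB]
        have hroot : (scanB d n s nxt live f (nxt.getD prev 0)
            (nxt.getD (nxt.getD prev 0) 0)).1.getD prev 0 = nxt.getD prev 0 :=
          ihq prev (by omega)
        have hunfA := strFrom_unfold d nxt n hG (nxt.getD prev 0) hile
        have hunfB := strFrom_unfold d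
          (scanB d n s nxt live f (nxt.getD prev 0) (nxt.getD (nxt.getD prev 0) 0)).1 n ihG
          (nxt.getD prev 0) hile
        refine ⟨ihG, ?_, ?_, ?_⟩
        · rw [hroot, hunfB, ihstr, hunfA,
            consumeOne_cons_of_not_prefix s _ _ (by rw [hunfA] at hnp; exact hnp)]
        · rw [hroot, hunfB, hunfA]
          simp only [List.length_cons]
          push_cast
          omega
        · intro q hq
          exact ihq q (by omega)
    · have hsB : scanB d n s nxt live (f + 1) prev (nxt.getD prev 0) = (nxt, live) := by
        simp only [scanB]
        rw [if_neg hile]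
      rw [hsB]
      rw [strFrom_end d nxt n (nxt.getD prev 0) (by omega), consumeOne_nil]
      exact ⟨hG, rfl, by simp, fun q _ => rfl⟩

theorem consume_fold (d : List Char) (n : Nat) (spell : List String) :
    ∀ (nxt : List Nat) (live : Int), Good n nxt →
      live = ((strFrom d nxt n (nxt.getD 0 0)).length : Int) →
      (spell.foldl (fun st s => scanB d n s.toList st.1 st.2 (n + 1) 0 (st.1.getD 0 0))
          (nxt, live)).2
        = (((spell.foldl (fun acc s => consumeOne s.toList acc)
            (strFrom d nxt n (nxt.getD 0 0))).length : Nat) : Int) := by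
  induction spell with
  | nil =>
    intro nxt live hG hlive
    simpa using hlive
  | cons s rest ih =>
    intro nxt live hG hlive
    have h0 := hG.2 0 (Nat.zero_le n)
    obtain ⟨hG1, hstr1, hlen1, _⟩ :=
      scan_spec d n s.toList (n + 1) 0 nxt live hG (Nat.zero_le n) (by omega)
    simp only [List.foldl_cons]
    rw [ih (scanB d n s.toList nxt live (n + 1) 0 (nxt.getD 0 0)).1
        (scanB d n s.toList nxt live (n + 1) 0 (nxt.getD 0 0)).2 hG1 (by omega), hstr1]

theorem getD_range' (n i : Nat) (h : i < n + 1) : (List.range' 1 (n + 1)).getD i 0 = i + 1 := by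
  rw [List.getD_eq_getElem?_getD, List.getElem?_eq_getElem (by simpa using h)]
  simp [List.getElem_range']
  omega

theorem good_init (n : Nat) : Good n (List.range' 1 (n + 1)) := by
  refine ⟨by simp, ?_⟩
  intro i hi
  rw [getD_range' n i (by omega)]
  omega

theorem strFrom_init (d : List Char) (n : Nat) (hd : d.length = n) :
    ∀ i, 0 < i → i ≤ n + 1 → strFrom d (List.range' 1 (n + 1)) n i = d.drop (i - 1) := by
  have hG := good_init n
  suffices hk : ∀ k i, n + 1 ≤ i + k → 0 < i → i ≤ n + 1 →
      strFrom d (List.range' 1 (n + 1)) n i = d.drop (i - 1) by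
    intro i h1 h2
    exact hk (n + 1) i (by omega) h1 h2
  intro k
  induction k with
  | zero =>
    intro i h1 h2 h3
    have hieq : i = n + 1 := by omega
    subst hieq
    rw [strFrom_end d _ n (n + 1) (by omega), List.drop_eq_nil_of_le (by omega)]
  | succ k ihk =>
    intro i h1 h2 h3
    by_cases hile : i ≤ n
    · rw [strFrom_unfold d _ n hG i hile, getD_range' n i (by omega),
        ihk (i + 1) (by omega) (by omega) (by omega)]
      have hlt : i - 1 < d.length := by omega
      rw [List.drop_eq_getElem_cons hlt]
      have : i - 1 + 1 = i := by omega
      rw [this]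
      congr 1
      rw [chrD, List.getD_eq_getElem?_getD, List.getElem?_eq_getElem hlt]
      simp
    · have hieq : i = n + 1 := by omega
      subst hieq
      rw [strFrom_end d _ n (n + 1) (by omega), List.drop_eq_nil_of_le (by omega)]

theorem consumeB_len (d : List Char) (spell : List String) (hd : d.length = spell.length) :
    (consumeB spell spell.length d).2
      = ((spell.foldl (fun acc s => consumeOne s.toList acc) d).length : Int) := by
  unfold consumeB
  have hG := good_init spell.length
  have h1 : (List.range' 1 (spell.length + 1)).getD 0 0 = 1 := getD_range' spell.length 0 (by omega)
  have hs : strFrom d (List.range' 1 (spell.length + 1)) spell.length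
      ((List.range' 1 (spell.length + 1)).getD 0 0) = d := by
    rw [h1, strFrom_init d spell.length hd 1 (by omega) (by omega)]
    simp
  rw [consume_fold d spell.length spell (List.range' 1 (spell.length + 1)) (spell.length : Int) hG
    (by rw [hs, hd]), hs]

theorem loop_eq (spell : List String) (dic : List String) :
    loopA spell dic = loopB spell spell.length dic := by
  induction dic with
  | nil => rfl
  | cons d rest ih =>
    simp only [loopA, loopB]
    by_cases hlen : d.toList.length = spell.length
    · rw [if_pos hlen]
      have hbeq : (spell.length == d.toList.length) = true := by
        rw [beq_iff_eq, hlen]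
      have hfold : spell.foldl
          (fun acc s => if PySem.Chars.isIn s.toList acc then removeFirstA s.toList acc else acc)
          d.toList = spell.foldl (fun acc s => consumeOne s.toList acc) d.toList := rfl
      rw [hfold, hbeq, consumeB_len d.toList spell hlen]
      by_cases hemp : (spell.foldl (fun acc s => consumeOne s.toList acc) d.toList).length = 0
      · have h1 : (spell.foldl (fun acc s => consumeOne s.toList acc) d.toList).isEmpty = true := by
          rw [List.isEmpty_iff, ← List.length_eq_zero_iff]
          exact hemp
        rw [h1, if_pos (show ((spell.foldl (fun acc s => consumeOne s.toList acc)
          d.toList).length : Int) = 0 by exact_mod_cast hemp)]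
        simp
      · have h1 : (spell.foldl (fun acc s => consumeOne s.toList acc) d.toList).isEmpty = false := by
          rw [List.isEmpty_eq_false_iff, ← List.length_pos_iff_ne_nil]
          omega
        rw [h1, if_neg (show ¬ ((spell.foldl (fun acc s => consumeOne s.toList acc)
          d.toList).length : Int) = 0 by exact_mod_cast hemp)]
        simpa using ih
    · rw [if_neg hlen]
      have hbeq : (spell.length == d.toList.length) = false := by
        rw [beq_eq_false_iff_ne]
        exact fun he => hlen he.symm
      rw [hbeq]
      simpa using ih

-- ===== VERDICT (by name: the statement is the Claim_ definition above) =====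
theorem solution_spec : Claim_equal_solution := by
  intro spell dic _
  unfold Spec_solution solution solution_alt
  exact loop_eq spell dic
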